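-- pv_equiv track=rewrite | github.com/patrickmay/advent-of-code-2018 | day2.py | count_exists
-- ===== SOURCE A (Python) =====
-- from collections import Counter
--
-- def count_exists(id,count):
--     """
--     Return True if the ID contains exactly COUNT instances of any letter.
--     """
--     exists = False
--     counts = Counter(list(id))
--     for c in counts.values():
--         if c == count:
--             exists = True
--             break
--
--     return exists
-- ===== SOURCE B (Python) =====
-- def count_exists(id, count):
--     """
--     Return True if the ID contains exactly COUNT instances of any letter.
--     """
--     s = sorted(id)
--     if not s:
--         return False
--     prev = s[0]
--     run = 1
--     for c in s[1:]:
--         if c == prev: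
--             run += 1
--         else:
--             if run == count:
--                 return True
--             prev = c
--             run = 1
--     return run == count
-- ===== Notes on version B (the rewrite author's own statement) =====
-- stated objective: alternative
-- what changed: Replaced the Counter hash-count build plus flag/break loop over counts.values() by a sort-then-scan: sort the characters and walk the sorted list measuring run lengths, returning True as soon as a run of length count ends.
import Mathlib
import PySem

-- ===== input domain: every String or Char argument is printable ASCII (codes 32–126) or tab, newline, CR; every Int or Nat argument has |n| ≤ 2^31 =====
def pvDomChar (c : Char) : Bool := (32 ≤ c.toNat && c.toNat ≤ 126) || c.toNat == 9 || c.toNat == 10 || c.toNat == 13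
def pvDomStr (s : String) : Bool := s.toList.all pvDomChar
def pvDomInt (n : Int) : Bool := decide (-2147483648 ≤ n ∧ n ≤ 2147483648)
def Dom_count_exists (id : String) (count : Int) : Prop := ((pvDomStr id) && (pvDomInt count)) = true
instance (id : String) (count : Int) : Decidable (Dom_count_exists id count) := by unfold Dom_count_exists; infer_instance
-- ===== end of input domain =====

-- B replaces the Counter build and flag/break loop by sort-then-scan over run lengths — alternative algorithm, not faster.


-- ===== PORT A =====
-- 'for c in counts.values(): if c == count: exists = True; break' as structural recursion
def ceLoopA (vs : List Int) (count : Int) : Bool :=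
  match vs with
  | [] => false
  | c :: rest => if c == count then true else ceLoopA rest count

def count_exists (id : String) (count : Int) : Bool :=
  let counts := PySem.Dict.counter id.toList
  ceLoopA counts.values count

-- ===== PORT B =====
-- 'for c in s[1:]: …' of Source B: walk the sorted list keeping (prev, run); early return on 'run == count'
def ceRunLoop (count : Int) : List Char → Char → Nat → Bool
  | [], _, run => ((run : Int) == count)
  | c :: rest, prev, run =>
    if c == prev then ceRunLoop count rest prev (run + 1)
    else if (run : Int) == count then true
    else ceRunLoop count rest c 1

def count_exists_alt (id : String) (count : Int) : Bool :=
  let s := PySem.List.sorted id.toList (fun x => x) false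
  match s with
  | [] => false
  | prev :: rest => ceRunLoop count rest prev 1

-- ===== PRECONDITION & SPEC =====
def Spec_count_exists (id : String) (count : Int) (out : Bool) : Prop := out = count_exists_alt id count
instance (id : String) (count : Int) (out : Bool) : Decidable (Spec_count_exists id count out) := by unfold Spec_count_exists; infer_instance

-- ===== CLAIM (what is proved, stated in full; the proofs are below) =====
def Claim_equal_count_exists : Prop := ∀ (id : String) (count : Int), Dom_count_exists id count → Spec_count_exists id count (count_exists id count)

-- ===== LEMMAS AND PROOFS =====
theorem pvCountConsNe {α : Type} [BEq α] [LawfulBEq α] {a b : α} (h : a ≠ b) (l : List α) :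
    (b :: l).count a = l.count a := by
  simp [Ne.symm h]

theorem ceLoopA_eq_any (vs : List Int) (count : Int) :
    ceLoopA vs count = vs.any (fun c => c == count) := by
  induction vs with
  | nil => rfl
  | cons c rest ih => by_cases h : c = count <;> simp [ceLoopA, h, ih]

-- A = true iff some character of the string has multiplicity count
theorem count_exists_iff (id : String) (count : Int) :
    count_exists id count = true ↔ ∃ c ∈ id.toList, (id.toList.count c : Int) = count := by
  unfold count_exists
  rw [ceLoopA_eq_any]
  simp only [PySem.Dict.values, PySem.Dict.items_counter, List.map_map, List.any_map,
    List.any_eq_true, Function.comp_def, beq_iff_eq]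
  constructor
  · rintro ⟨k, hk, h⟩
    exact ⟨k, (PySem.Set.mem_ofList _ _).mp hk, h⟩
  · rintro ⟨k, hk, h⟩
    exact ⟨k, (PySem.Set.mem_ofList _ _).mpr hk, h⟩

-- the run-length scan on a sorted tail, with prev minimal and an open run of length r
theorem ceRunLoop_iff (count : Int) (ys : List Char) (c : Char) (r : Nat)
    (hs : ys.Pairwise (· ≤ ·)) (hc : ∀ d ∈ ys, c ≤ d) :
    ceRunLoop count ys c r = true ↔
      ((r + ys.count c : Nat) : Int) = count ∨ ∃ d ∈ ys, c < d ∧ ((ys.count d : Nat) : Int) = count := by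
  induction ys generalizing c r with
  | nil => simp [ceRunLoop]
  | cons d rest ih =>
    have hdrest : ∀ e ∈ rest, d ≤ e := (List.pairwise_cons.mp hs).1
    have hrest : rest.Pairwise (· ≤ ·) := (List.pairwise_cons.mp hs).2
    by_cases hdc : d = c
    · subst hdc
      rw [show ceRunLoop count (d :: rest) d r = ceRunLoop count rest d (r + 1) by
        simp [ceRunLoop]]
      rw [ih d (r + 1) hrest hdrest]
      constructor
      · rintro (h | ⟨e, he, hde, hcnt⟩)
        · left; rw [List.count_cons_self]; push_cast at h ⊢; omega
        · right
          refine ⟨e, List.mem_cons_of_mem _ he, hde, ?_⟩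
          rw [pvCountConsNe (Ne.symm (ne_of_lt hde))]
          exact hcnt
      · rintro (h | ⟨e, he, hde, hcnt⟩)
        · left; rw [List.count_cons_self] at h; push_cast at h ⊢; omega
        · rcases List.mem_cons.mp he with rfl | he'
          · exact absurd hde (lt_irrefl _)
          · right
            refine ⟨e, he', hde, ?_⟩
            rw [pvCountConsNe (Ne.symm (ne_of_lt hde))] at hcnt
            exact hcnt
    · have hcd : c < d := lt_of_le_of_ne (hc d (List.mem_cons_self)) (fun h => hdc h.symm)
      have hnc : (d :: rest).count c = 0 := by
        rw [List.count_eq_zero]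
        intro hmem
        rcases List.mem_cons.mp hmem with h | h
        · exact hdc h.symm
        · exact absurd (hdrest c h) (not_le.mpr hcd)
      rw [show ceRunLoop count (d :: rest) c r
            = if (r : Int) == count then true else ceRunLoop count rest d 1 by
        simp [ceRunLoop, hdc]]
      by_cases hr : (r : Int) = count
      · simp only [hr, beq_self_eq_true, if_true]
        constructor
        · intro _; left; rw [hnc]; push_cast; omega
        · intro _; trivial
      · rw [if_neg (by simpa using hr)]
        rw [ih d 1 hrest hdrest]
        constructor
        · rintro (h | ⟨e, he, hde, hcnt⟩)
          · right
            refine ⟨d, List.mem_cons_self, hcd, ?_⟩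
            rw [List.count_cons_self]; push_cast at h ⊢; omega
          · right
            refine ⟨e, List.mem_cons_of_mem _ he, lt_trans hcd hde, ?_⟩
            rw [pvCountConsNe (Ne.symm (ne_of_lt hde))]
            exact hcnt
        · rintro (h | ⟨e, he, hce, hcnt⟩)
          · rw [hnc] at h; push_cast at h; omega
          · rcases List.mem_cons.mp he with rfl | he'
            · left
              rw [List.count_cons_self] at hcnt; push_cast at hcnt ⊢; omega
            · by_cases hed : e = d
              · subst hed
                left
                rw [List.count_cons_self] at hcnt; push_cast at hcnt ⊢; omega
              · right
                refine ⟨e, he', lt_of_le_of_ne (hdrest e he') (fun h => hed h.symm), ?_⟩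
                rw [pvCountConsNe hed] at hcnt
                exact hcnt

-- B = true iff some character of the string has multiplicity count
theorem count_exists_alt_iff (id : String) (count : Int) :
    count_exists_alt id count = true ↔ ∃ c ∈ id.toList, (id.toList.count c : Int) = count := by
  unfold count_exists_alt
  have hperm : (PySem.List.sorted id.toList (fun x => x) false).Perm id.toList :=
    PySem.List.sorted_perm _ _ _
  have hpw : (PySem.List.sorted id.toList (fun x => x) false).Pairwise (· ≤ ·) := by
    simpa using PySem.List.sorted_pairwise (xs := id.toList) (key := fun x => x)
  rcases hS : PySem.List.sorted id.toList (fun x => x) false with _ | ⟨p, rest⟩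
  · simp only [hS] at hperm
    have : id.toList = [] := hperm.symm.eq_nil
    simp [this]
  · rw [hS] at hperm hpw
    have hprest : ∀ e ∈ rest, p ≤ e := (List.pairwise_cons.mp hpw).1
    have hrest : rest.Pairwise (· ≤ ·) := (List.pairwise_cons.mp hpw).2
    simp only
    rw [ceRunLoop_iff count rest p 1 hrest hprest]
    have hcnt : ∀ c : Char, id.toList.count c = (p :: rest).count c :=
      fun c => (hperm.count_eq c).symm
    have hmem : ∀ c : Char, c ∈ id.toList ↔ c ∈ (p :: rest) :=
      fun c => hperm.mem_iff.symm
    constructor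
    · rintro (h | ⟨d, hd, hpd, hcd⟩)
      · refine ⟨p, (hmem p).mpr List.mem_cons_self, ?_⟩
        rw [hcnt p, List.count_cons_self]; push_cast at h ⊢; omega
      · refine ⟨d, (hmem d).mpr (List.mem_cons_of_mem _ hd), ?_⟩
        rw [hcnt d, pvCountConsNe (Ne.symm (ne_of_lt hpd))]
        exact hcd
    · rintro ⟨c, hcmem, hcc⟩
      rw [hcnt c] at hcc
      rcases List.mem_cons.mp ((hmem c).mp hcmem) with rfl | hc'
      · left
        rw [List.count_cons_self] at hcc; push_cast at hcc ⊢; omega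
      · by_cases hcp : c = p
        · subst hcp
          left
          rw [List.count_cons_self] at hcc; push_cast at hcc ⊢; omega
        · right
          refine ⟨c, hc', lt_of_le_of_ne (hprest c hc') (fun h => hcp h.symm), ?_⟩
          rw [pvCountConsNe hcp] at hcc
          exact hcc

-- ===== VERDICT (by name: the statement is the Claim_ definition above) =====
theorem count_exists_spec : Claim_equal_count_exists := by
  intro id count _
  unfold Spec_count_exists
  rw [Bool.eq_iff_iff, count_exists_iff, count_exists_alt_iff]
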